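-- pv_equiv track=rewrite | github.com/TaskGuru-AI/tasks_support_system_ai | tasks_support_system_ai/data/parse_data.py | build_immediate_parent_map
-- ===== SOURCE A (Python) =====
-- def build_immediate_parent_map(all_queue_ids: set, queue_to_descendants: dict) -> dict:
--     """Create mapping of queue IDs to their immediate parents."""
--     immediate_parent = {}
--     for queue_id in all_queue_ids:
--         potential_parents = [
--             (parent_id, len(descendants))
--             for parent_id, descendants in queue_to_descendants.items()
--             if queue_id != parent_id and queue_id in descendants
--         ]
--         immediate_parent[queue_id] = (
--             min(potential_parents, key=lambda x: x[1])[0] if potential_parents else None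
--         )
--     return immediate_parent
-- ===== SOURCE B (Python) =====
-- def build_immediate_parent_map(all_queue_ids: set, queue_to_descendants: dict) -> dict:
--     """Create mapping of queue IDs to their immediate parents."""
--     # Single pass over every parent's descendant list, keeping per queue the
--     # first parent (in dict order) with the smallest descendant count.
--     best = {}
--     for parent_id, descendants in queue_to_descendants.items():
--         size = len(descendants)
--         for qid in descendants:
--             if qid == parent_id:
--                 continue
--             cur = best.get(qid)
--             if cur is None or size < cur[1]:
--                 best[qid] = (parent_id, size)
--     return {q: (best[q][0] if q in best else None) for q in all_queue_ids}
-- ===== Notes on version B (the rewrite author's own statement) =====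
-- stated objective: faster
-- what changed: Inverted the loops: instead of scanning the whole dict per queue id, B scans each parent's descendant list once, keeping per queue the first parent with the smallest descendant count in a dict, then reads it off per queue id.
import Mathlib
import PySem

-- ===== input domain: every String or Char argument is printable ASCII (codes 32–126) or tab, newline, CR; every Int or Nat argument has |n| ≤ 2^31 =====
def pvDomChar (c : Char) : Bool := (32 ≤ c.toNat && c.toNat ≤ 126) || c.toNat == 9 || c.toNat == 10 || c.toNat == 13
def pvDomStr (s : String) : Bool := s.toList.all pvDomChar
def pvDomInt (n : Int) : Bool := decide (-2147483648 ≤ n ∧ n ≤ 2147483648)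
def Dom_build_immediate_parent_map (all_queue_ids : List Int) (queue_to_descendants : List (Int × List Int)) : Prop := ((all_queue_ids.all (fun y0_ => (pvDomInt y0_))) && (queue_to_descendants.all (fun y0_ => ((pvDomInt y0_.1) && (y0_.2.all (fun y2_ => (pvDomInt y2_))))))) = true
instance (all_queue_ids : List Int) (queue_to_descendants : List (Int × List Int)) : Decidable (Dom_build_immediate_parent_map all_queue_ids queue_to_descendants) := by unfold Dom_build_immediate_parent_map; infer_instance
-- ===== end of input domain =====

-- B inverts the loops (one pass over each parent's descendant list, min-size parent tracked per queue) for an asymptotic speed-up; proved to return A's exact value.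


-- ===== PORT A =====
-- For each queue id: list-comprehension over the dict items (filter + map), then
-- min(..., key=lambda x: x[1])[0] if nonempty else None, stored in a dict.
def build_immediate_parent_map (all_queue_ids : List Int) (queue_to_descendants : List (Int × List Int)) : List (Int × Option Int) :=
  (all_queue_ids.foldl (fun (d : PySem.Dict Int (Option Int)) q =>
      let pp := (queue_to_descendants.filter
                   (fun pd => decide (q ≠ pd.1) && pd.2.contains q)).map
                 (fun pd => (pd.1, (pd.2.length : Int)))
      d.insert q (if pp.isEmpty then none
                  else match PySem.List.min? pp (fun x => x.2) with
                       | some m => some m.1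
                       | none => none))
    PySem.Dict.empty).items

-- ===== PORT B =====
-- One update of the running best (parent, size) for queue q from entry with parent p, size n.
def bimStep (p : Int) (n : Int) (b : PySem.Dict Int (Int × Int)) (q : Int) : PySem.Dict Int (Int × Int) :=
  if q == p then b
  else
    match b.get? q with
    | none => b.insert q (p, n)
    | some cur => if n < cur.2 then b.insert q (p, n) else b

def build_immediate_parent_map_alt (all_queue_ids : List Int) (queue_to_descendants : List (Int × List Int)) : List (Int × Option Int) :=
  let best : PySem.Dict Int (Int × Int) :=
    queue_to_descendants.foldl
      (fun b pd => pd.2.foldl (bimStep pd.1 (pd.2.length : Int)) b)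
      PySem.Dict.empty
  (all_queue_ids.foldl (fun (d : PySem.Dict Int (Option Int)) q =>
      d.insert q ((best.get? q).map (fun pr => pr.1)))
    PySem.Dict.empty).items

-- ===== PRECONDITION & SPEC =====
def Spec_build_immediate_parent_map (all_queue_ids : List Int) (queue_to_descendants : List (Int × List Int)) (out : List (Int × Option Int)) : Prop := out = build_immediate_parent_map_alt all_queue_ids queue_to_descendants
instance (all_queue_ids : List Int) (queue_to_descendants : List (Int × List Int)) (out : List (Int × Option Int)) : Decidable (Spec_build_immediate_parent_map all_queue_ids queue_to_descendants out) := by unfold Spec_build_immediate_parent_map; infer_instance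

-- ===== CLAIM (what is proved, stated in full; the proofs are below) =====
def Claim_equal_build_immediate_parent_map : Prop := ∀ (all_queue_ids : List Int) (queue_to_descendants : List (Int × List Int)), Dom_build_immediate_parent_map all_queue_ids queue_to_descendants → Spec_build_immediate_parent_map all_queue_ids queue_to_descendants (build_immediate_parent_map all_queue_ids queue_to_descendants)

-- ===== LEMMAS AND PROOFS =====

-- min?'s fold step for one candidate entry (p, n).
def bimOp (p n : Int) (o : Option (Int × Int)) : Option (Int × Int) :=
  match o with
  | none => some (p, n)
  | some pr => if n < pr.2 then some (p, n) else pr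

theorem bimOp_idem (p n : Int) (o : Option (Int × Int)) : bimOp p n (bimOp p n o) = bimOp p n o := by
  cases o with
  | none => simp [bimOp]
  | some pr =>
    simp only [bimOp]
    split_ifs <;> simp_all

-- The inner loop over one descendant list updates exactly the queues in it (other than p).
theorem bimStep_fold_get? (p n : Int) (d : List Int) (b : PySem.Dict Int (Int × Int)) (x : Int) :
    (d.foldl (bimStep p n) b).get? x
      = if x ≠ p ∧ x ∈ d then bimOp p n (b.get? x) else b.get? x := by
  induction d generalizing b with
  | nil => simp
  | cons y d ih =>
    simp only [List.foldl_cons]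
    by_cases hyp : y = p
    · subst hyp
      rw [ih]
      simp only [bimStep, BEq.rfl, if_true]
      by_cases hx : x ≠ y ∧ x ∈ d
      · rw [if_pos hx, if_pos ⟨hx.1, List.mem_cons_of_mem _ hx.2⟩]
      · rw [if_neg hx]
        by_cases hx2 : x ≠ y ∧ x ∈ y :: d
        · rcases hx2 with ⟨hne, hmem⟩
          rcases List.mem_cons.mp hmem with h | h
          · exact absurd h hne
          · exact absurd ⟨hne, h⟩ hx
        · rw [if_neg hx2]
    · have hb : (y == p) = false := by simp [hyp]
      have hget : (bimStep p n b y).get? x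
          = if x = y then bimOp p n (b.get? x) else b.get? x := by
        simp only [bimStep, hb, Bool.false_eq_true, if_false]
        by_cases hxy : x = y
        · subst hxy
          cases hg : b.get? x with
          | none => simp [bimOp, PySem.Dict.get?_insert_self]
          | some cur =>
            simp only [bimOp]
            split_ifs with h
            · exact PySem.Dict.get?_insert_self b x (p, n)
            · exact hg
        · rw [if_neg hxy]
          cases hg : b.get? y with
          | none => exact PySem.Dict.get?_insert_of_ne _ _ hxy
          | some cur =>
            simp only []
            split_ifs with h
            · exact PySem.Dict.get?_insert_of_ne _ _ hxy
            · rfl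
      rw [ih, hget]
      by_cases hxy : x = y
      · subst hxy
        rw [if_pos rfl]
        by_cases hd : x ∈ d
        · rw [if_pos ⟨hyp, hd⟩, bimOp_idem, if_pos ⟨hyp, List.mem_cons_self⟩]
        · rw [if_neg (fun hc => hd hc.2), if_pos ⟨hyp, List.mem_cons_self⟩]
      · rw [if_neg hxy]
        by_cases hd : x ≠ p ∧ x ∈ d
        · rw [if_pos hd, if_pos ⟨hd.1, List.mem_cons_of_mem _ hd.2⟩]
        · rw [if_neg hd]
          have : ¬(x ≠ p ∧ x ∈ y :: d) := by
            rintro ⟨hne, hmem⟩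
            rcases List.mem_cons.mp hmem with h | h
            · exact hxy h
            · exact hd ⟨hne, h⟩
          rw [if_neg this]

-- The whole best-building fold, read at one key, is a fold of bimOp over the matching entries.
theorem best_get? (L : List (Int × List Int)) (b : PySem.Dict Int (Int × Int)) (x : Int) :
    (L.foldl (fun b pd => pd.2.foldl (bimStep pd.1 (pd.2.length : Int)) b) b).get? x
      = L.foldl (fun o pd => if decide (x ≠ pd.1) && pd.2.contains x then
                   bimOp pd.1 (pd.2.length : Int) o else o) (b.get? x) := by
  induction L generalizing b with
  | nil => simp
  | cons pd L ih =>
    simp only [List.foldl_cons]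
    rw [ih, bimStep_fold_get?]
    by_cases h : x ≠ pd.1 ∧ x ∈ pd.2
    · rw [if_pos h]
      have : (decide (x ≠ pd.1) && pd.2.contains x) = true := by
        simp [h.1, h.2]
      rw [this]
      simp
    · rw [if_neg h]
      have : (decide (x ≠ pd.1) && pd.2.contains x) = false := by
        by_contra hc
        rw [Bool.not_eq_false, Bool.and_eq_true] at hc
        exact h ⟨by simpa using hc.1, by simpa using hc.2⟩
      rw [this]
      simp

-- The per-key fold of bimOp over matching entries IS min? of A's comprehension list.
theorem best_eq_min? (L : List (Int × List Int)) (x : Int) :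
    (L.foldl (fun o pd => if decide (x ≠ pd.1) && pd.2.contains x then
                 bimOp pd.1 (pd.2.length : Int) o else o) none)
      = PySem.List.min?
          ((L.filter (fun pd => decide (x ≠ pd.1) && pd.2.contains x)).map
            (fun pd => (pd.1, (pd.2.length : Int))))
          (fun y => y.2) := by
  rw [PySem.List.foldl_if_eq_foldl_filter
        (p := fun pd : Int × List Int => decide (x ≠ pd.1) && pd.2.contains x)
        (f := fun o pd => bimOp pd.1 (pd.2.length : Int) o)]
  rw [PySem.List.min?, List.foldl_map]
  refine PySem.List.foldl_congr_mem _ _ _ _ (fun o pd _ => ?_)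
  cases o with
  | none => rfl
  | some pr => rfl

-- A's per-key value equals B's per-key value.
theorem val_eq (q : Int) (queue_to_descendants : List (Int × List Int)) :
    (if ((queue_to_descendants.filter (fun pd => decide (q ≠ pd.1) && pd.2.contains q)).map
           (fun pd => (pd.1, (pd.2.length : Int)))).isEmpty then none
     else match PySem.List.min?
            ((queue_to_descendants.filter (fun pd => decide (q ≠ pd.1) && pd.2.contains q)).map
              (fun pd => (pd.1, (pd.2.length : Int)))) (fun x => x.2) with
          | some m => some m.1
          | none => none)
      = ((queue_to_descendants.foldl
            (fun b pd => pd.2.foldl (bimStep pd.1 (pd.2.length : Int)) b)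
            PySem.Dict.empty).get? q).map (fun pr => pr.1) := by
  rw [best_get?, PySem.Dict.get?_empty, best_eq_min?]
  set pp := (queue_to_descendants.filter (fun pd => decide (q ≠ pd.1) && pd.2.contains q)).map
              (fun pd => (pd.1, (pd.2.length : Int))) with hpp
  cases hmin : PySem.List.min? pp (fun x => x.2) with
  | none =>
    have : pp = [] := (PySem.List.min?_eq_none_iff pp _).mp hmin
    simp [this]
  | some m =>
    have : pp ≠ [] := by
      intro h
      rw [h] at hmin
      simp [PySem.List.min?] at hmin
    simp [List.isEmpty_iff, this]

-- ===== VERDICT (by name: the statement is the Claim_ definition above) =====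
theorem build_immediate_parent_map_spec : Claim_equal_build_immediate_parent_map := by
  intro ids q2d _
  unfold Spec_build_immediate_parent_map build_immediate_parent_map build_immediate_parent_map_alt
  congr 1
  refine PySem.List.foldl_congr_mem _ _ _ _ (fun d q _ => ?_)
  exact congrArg (d.insert q) (val_eq q q2d)
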